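-- pv_equiv track=rewrite | github.com/arthurparm/janus-completo | backend/app/core/agents/utils.py | _extract_json_candidates
-- ===== SOURCE A (Python) =====
-- def _extract_json_candidates(text: str) -> list[str]:
--     """
--     Extract possible JSON object/array substrings from a larger text.
--
--     This scans for balanced {} or [] blocks while respecting string literals.
--     """
--     if not text:
--         return []
--
--     candidates: list[str] = []
--     stack: list[str] = []
--     start_idx: int | None = None
--     in_string = False
--     escape = False
--
--     for idx, ch in enumerate(text):
--         if in_string:
--             if escape:
--                 escape = False
--                 continue
--             if ch == "\\":
--                 escape = True
--                 continue
--             if ch == '"':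
--                 in_string = False
--             continue
--
--         if ch == '"':
--             in_string = True
--             continue
--
--         if ch in "{[":
--             if not stack:
--                 start_idx = idx
--             stack.append(ch)
--             continue
--
--         if ch in "}]":
--             if not stack:
--                 continue
--             open_ch = stack[-1]
--             if (open_ch == "{" and ch == "}") or (open_ch == "[" and ch == "]"):
--                 stack.pop()
--                 if not stack and start_idx is not None:
--                     candidates.append(text[start_idx : idx + 1])
--                     start_idx = None
--             else:
--                 # Mismatch: reset stack to avoid cascading errors
--                 stack = []
--                 start_idx = None
--
--     return candidates
-- ===== SOURCE B (Python) =====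
-- def _skip_string(text: str, i: int) -> int:
--     """Return the index just past the closing quote of the string starting at i."""
--     escape = False
--     while i < len(text):
--         ch = text[i]
--         if escape:
--             escape = False
--         elif ch == "\\":
--             escape = True
--         elif ch == '"':
--             return i + 1
--         i += 1
--     return i
--
--
-- def _match_block(text: str, closer: str, i: int):
--     """Scan from i for the closer of an already-seen opener.
--
--     Returns ("ok", j) with j the index of the matching closer,
--     ("mismatch", j) with j the index of a wrong closer, or
--     ("end", len(text)) if the text runs out first."""
--     while i < len(text):
--         ch = text[i]
--         if ch == '"':
--             i = _skip_string(text, i + 1)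
--             continue
--         if ch in "{[":
--             status, j = _match_block(text, "}" if ch == "{" else "]", i + 1)
--             if status != "ok":
--                 return status, j
--             i = j + 1
--             continue
--         if ch in "}]":
--             return ("ok", i) if ch == closer else ("mismatch", i)
--         i += 1
--     return "end", len(text)
--
--
-- def _extract_json_candidates(text: str) -> list[str]:
--     # Recursive descent: no explicit bracket stack; nesting lives on the call stack.
--     out: list[str] = []
--     i = 0
--     while i < len(text):
--         ch = text[i]
--         if ch == '"':
--             i = _skip_string(text, i + 1)
--         elif ch in "{[":
--             status, j = _match_block(text, "}" if ch == "{" else "]", i + 1)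
--             if status == "ok":
--                 out.append(text[i:j + 1])
--             i = j + 1 if status != "end" else j
--         else:
--             i += 1
--     return out
-- ===== Notes on version B (the rewrite author's own statement) =====
-- stated objective: alternative
-- what changed: A's single fused scan with an explicit bracket stack and in_string/escape flags is replaced by a recursive-descent scanner: a string-skipping helper and a recursive _match_block that carries nesting on the call stack (no bracket stack, no start_idx/in_string state), with a top-level loop that emits each balanced block it parses.
import Mathlib
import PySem

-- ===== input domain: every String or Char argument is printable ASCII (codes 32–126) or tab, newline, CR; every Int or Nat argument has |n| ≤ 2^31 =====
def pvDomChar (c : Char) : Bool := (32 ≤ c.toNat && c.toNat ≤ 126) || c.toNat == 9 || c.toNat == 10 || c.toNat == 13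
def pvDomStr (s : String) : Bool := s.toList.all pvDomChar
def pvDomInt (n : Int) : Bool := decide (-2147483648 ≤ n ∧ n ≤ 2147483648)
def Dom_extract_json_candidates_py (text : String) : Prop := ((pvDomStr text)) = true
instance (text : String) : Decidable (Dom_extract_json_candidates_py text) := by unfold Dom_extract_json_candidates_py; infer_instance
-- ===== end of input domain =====

-- B replaces A's explicit bracket stack with a recursive-descent scanner (nesting on
-- the call stack, with a separate string-skipping helper); objective: alternative.

-- ===== PORT A =====
-- A's single loop: state = (candidates, stack, start_idx, in_string, escape).
def pvGoA (text : List Char) :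
    List (Int × Char) → List String → List Char → Option Int → Bool → Bool → List String
  | [], cand, _, _, _, _ => cand
  | (idx, ch) :: rest, cand, stack, start, ins, esc =>
    if ins then
      if esc then pvGoA text rest cand stack start ins false
      else if ch = '\\' then pvGoA text rest cand stack start ins true
      else if ch = '"' then pvGoA text rest cand stack start false esc
      else pvGoA text rest cand stack start ins esc
    else if ch = '"' then pvGoA text rest cand stack start true esc
    else if ch = '{' ∨ ch = '[' then
      pvGoA text rest cand (ch :: stack) (if stack.isEmpty then some idx else start) ins esc
    else if ch = '}' ∨ ch = ']' then
      match stack with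
      | [] => pvGoA text rest cand [] start ins esc
      | open_ch :: stack' =>
        if (open_ch = '{' ∧ ch = '}') ∨ (open_ch = '[' ∧ ch = ']') then
          if stack'.isEmpty then
            match start with
            | some s =>
              pvGoA text rest
                (cand ++ [String.ofList (PySem.List.slice text (some s) (some (idx + 1)))])
                stack' none ins esc
            | none => pvGoA text rest cand stack' start ins esc
          else pvGoA text rest cand stack' start ins esc
        else pvGoA text rest cand [] none ins esc
    else pvGoA text rest cand stack start ins esc

def extract_json_candidates_py (text : String) : List String :=
  if text.toList.isEmpty then []
  else pvGoA text.toList (PySem.List.enumerate text.toList) [] [] none false false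

-- ===== PORT B =====
-- _skip_string: consume a string literal; l = chars after the opening quote, i = their
-- first index; returns (chars after the closing quote, index just past it).
def pvSkipStr : List Char → Int → Bool → List Char × Int
  | [], i, _ => ([], i)
  | c :: rest, i, esc =>
    if esc then pvSkipStr rest (i + 1) false
    else if c = '\\' then pvSkipStr rest (i + 1) true
    else if c = '"' then (rest, i + 1)
    else pvSkipStr rest (i + 1) false

lemma pvSkipStr_len : ∀ (l : List Char) (i : Int) (esc : Bool),
    (pvSkipStr l i esc).1.length ≤ l.length := by
  intro l
  induction l with
  | nil => intro i esc; simp [pvSkipStr]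
  | cons c rest ih =>
    intro i esc
    simp only [pvSkipStr]
    split_ifs <;> first
      | exact le_trans (ih _ _) (Nat.le_succ _)
      | simp

-- _match_block's three possible outcomes.
inductive PvSt | ok | mismatch | ended
deriving DecidableEq, Repr

-- _match_block: scan l (first index i) for the closer of an already-seen opener.
-- Returns (status, index, remaining chars with a length bound for termination).
def pvMatch (closer : Char) : (l : List Char) → Int → PvSt × Int × {r : List Char // r.length ≤ l.length}
  | [], i => (.ended, i, ⟨[], Nat.le_refl _⟩)
  | c :: rest, i =>
    if c = '"' then
      let p := pvSkipStr rest (i + 1) false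
      let res := pvMatch closer p.1 p.2
      ⟨res.1, res.2.1, res.2.2.1,
        le_trans res.2.2.2 (le_trans (pvSkipStr_len rest (i + 1) false) (Nat.le_succ _))⟩
    else if c = '{' ∨ c = '[' then
      match pvMatch (if c = '{' then '}' else ']') rest (i + 1) with
      | (st, j, r) =>
        if st = .ok then
          let res := pvMatch closer r.1 (j + 1)
          ⟨res.1, res.2.1, res.2.2.1, le_trans res.2.2.2 (le_trans r.2 (Nat.le_succ _))⟩
        else ⟨st, j, r.1, le_trans r.2 (Nat.le_succ _)⟩
    else if c = '}' ∨ c = ']' then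
      if c = closer then (.ok, i, ⟨rest, Nat.le_succ _⟩) else (.mismatch, i, ⟨rest, Nat.le_succ _⟩)
    else
      let res := pvMatch closer rest (i + 1)
      ⟨res.1, res.2.1, res.2.2.1, le_trans res.2.2.2 (Nat.le_succ _)⟩
termination_by l => l.length
decreasing_by
· exact Nat.lt_succ_of_le (pvSkipStr_len rest (i + 1) false)
· exact Nat.lt_succ_of_le (Nat.le_refl _)
· exact Nat.lt_succ_of_le r.2
· exact Nat.lt_succ_of_le (Nat.le_refl _)

-- the top-level while loop of _extract_json_candidates
def pvScan (text : List Char) : (l : List Char) → Int → List String → List String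
  | [], _, cand => cand
  | c :: rest, i, cand =>
    if c = '"' then
      let p := pvSkipStr rest (i + 1) false
      pvScan text p.1 p.2 cand
    else if c = '{' ∨ c = '[' then
      match pvMatch (if c = '{' then '}' else ']') rest (i + 1) with
      | (st, j, r) =>
        if st = .ok then
          pvScan text r.1 (j + 1)
            (cand ++ [String.ofList (PySem.List.slice text (some i) (some (j + 1)))])
        else if st = .mismatch then pvScan text r.1 (j + 1) cand
        else cand
    else pvScan text rest (i + 1) cand
termination_by l => l.length
decreasing_by
· exact Nat.lt_succ_of_le (pvSkipStr_len rest (i + 1) false)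
· exact Nat.lt_succ_of_le r.2
· exact Nat.lt_succ_of_le r.2
· exact Nat.lt_succ_of_le (Nat.le_refl _)

def extract_json_candidates_py_alt (text : String) : List String :=
  pvScan text.toList text.toList 0 []

-- ===== PRECONDITION & SPEC =====
def Spec_extract_json_candidates_py (text : String) (out : List String) : Prop := out = extract_json_candidates_py_alt text
instance (text : String) (out : List String) : Decidable (Spec_extract_json_candidates_py text out) := by unfold Spec_extract_json_candidates_py; infer_instance

-- ===== CLAIM (what is proved, stated in full; the proofs are below) =====
def Claim_equal_extract_json_candidates_py : Prop := ∀ (text : String), Dom_extract_json_candidates_py text → Spec_extract_json_candidates_py text (extract_json_candidates_py text)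

-- ===== LEMMAS AND PROOFS =====

-- A inside a string literal = pvSkipStr, then A continues out of string mode.
lemma pvGoA_string (text : List Char) :
    ∀ (l : List Char) (i : Int) (cand : List String) (stack : List Char)
      (start : Option Int) (esc : Bool),
    pvGoA text (PySem.List.enumerate l i) cand stack start true esc
      = pvGoA text (PySem.List.enumerate (pvSkipStr l i esc).1 (pvSkipStr l i esc).2)
          cand stack start false false := by
  intro l
  induction l with
  | nil => intro i cand stack start esc; simp [pvSkipStr, pvGoA]
  | cons c rest ih =>
    intro i cand stack start esc
    rw [PySem.List.enumerate_cons]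
    by_cases hesc : esc = true
    · subst hesc; simp [pvGoA, pvSkipStr, ih]
    · replace hesc : esc = false := by simpa using hesc
      subst hesc
      by_cases h1 : c = '\\'
      · simp [pvGoA, pvSkipStr, h1, ih]
      · by_cases h2 : c = '"'
        · simp [pvGoA, pvSkipStr, h1, h2]
        · simp [pvGoA, pvSkipStr, h1, h2, ih]

-- A with a nonempty all-opener stack = pvMatch for the top opener, then A continues.
lemma pvGoA_match (text : List Char) :
    ∀ (n : Nat) (l : List Char), l.length ≤ n →
    ∀ (i : Int) (cand : List String) (o : Char) (s : List Char) (start : Option Int),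
    (o = '{' ∨ o = '[') → (∀ x ∈ s, x = '{' ∨ x = '[') →
    pvGoA text (PySem.List.enumerate l i) cand (o :: s) start false false
      = (match pvMatch (if o = '{' then '}' else ']') l i with
         | (st, j, r) =>
           if st = .ok then
             (if s.isEmpty then
                match start with
                | some a =>
                  pvGoA text (PySem.List.enumerate r.1 (j + 1))
                    (cand ++ [String.ofList (PySem.List.slice text (some a) (some (j + 1)))])
                    [] none false false
                | none => pvGoA text (PySem.List.enumerate r.1 (j + 1)) cand [] start false false
              else pvGoA text (PySem.List.enumerate r.1 (j + 1)) cand s start false false)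
           else if st = .mismatch then
             pvGoA text (PySem.List.enumerate r.1 (j + 1)) cand [] none false false
           else cand) := by
  intro n
  induction n with
  | zero =>
    intro l hl i cand o s start ho hs
    have : l = [] := List.length_eq_zero_iff.mp (Nat.le_zero.mp hl)
    subst this
    simp [pvGoA, pvMatch]
  | succ n ih =>
    intro l hl i cand o s start ho hs
    cases l with
    | nil => simp [pvGoA, pvMatch]
    | cons c rest =>
      have hr : rest.length ≤ n := by simpa using hl
      rw [PySem.List.enumerate_cons]
      by_cases h2 : c = '"'
      · -- string literal: both sides skip it
        subst h2
        rw [show pvGoA text (((i, '"') :: PySem.List.enumerate rest (i+1))) cand (o :: s) start false false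
              = pvGoA text (PySem.List.enumerate rest (i+1)) cand (o :: s) start true false by
            simp [pvGoA]]
        rw [pvGoA_string]
        have hsk := pvSkipStr_len rest (i + 1) false
        rw [ih _ (le_trans hsk hr) _ _ _ _ _ ho hs]
        simp [pvMatch]
      · by_cases h3 : c = '{' ∨ c = '['
        · -- nested opener: A pushes; B recurses
          have hgo : pvGoA text (((i, c)) :: PySem.List.enumerate rest (i+1)) cand (o :: s) start false false
              = pvGoA text (PySem.List.enumerate rest (i+1)) cand (c :: o :: s) start false false := by
            simp [pvGoA, h2, h3]
          rw [hgo]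
          have hs' : ∀ x ∈ (o :: s), x = '{' ∨ x = '[' := by
            intro x hx; rcases List.mem_cons.mp hx with h | h
            · subst h; exact ho
            · exact hs x h
          rw [ih _ hr _ _ _ _ _ h3 hs']
          rcases hmi : pvMatch (if c = '{' then '}' else ']') rest (i + 1) with ⟨st, j, r⟩
          by_cases hok : st = PvSt.ok
          · subst hok
            have hlr : r.1.length ≤ n := le_trans r.2 hr
            simp only [List.isEmpty_cons, if_false, Bool.false_eq_true]
            rw [ih _ hlr _ _ _ _ _ ho hs]
            have : pvMatch (if o = '{' then '}' else ']') (c :: rest) i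
                = (match pvMatch (if c = '{' then '}' else ']') rest (i + 1) with
                   | (st, j, r) =>
                     if st = .ok then
                       let res := pvMatch (if o = '{' then '}' else ']') r.1 (j + 1)
                       ⟨res.1, res.2.1, res.2.2.1, le_trans res.2.2.2 (le_trans r.2 (Nat.le_succ _))⟩
                     else ⟨st, j, r.1, le_trans r.2 (Nat.le_succ _)⟩) := by
              rw [pvMatch]; simp [h2, h3]
            rw [this, hmi]
            simp
          · -- mismatch or ended propagates
            have : pvMatch (if o = '{' then '}' else ']') (c :: rest) i
                = ⟨st, j, r.1, le_trans r.2 (Nat.le_succ _)⟩ := by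
              rw [pvMatch]; simp [h2, h3, hmi, hok]
            rw [this]
            simp [hok]
        · by_cases h4 : c = '}' ∨ c = ']'
          · -- closer at this level: four literal opener/closer combinations
            rcases ho with rfl | rfl <;> rcases h4 with rfl | rfl
            · -- '{' closed by '}': A pops; pvMatch returns .ok
              have hm : pvMatch (if ('{':Char) = '{' then '}' else ']') ('}' :: rest) i
                  = (.ok, i, ⟨rest, Nat.le_succ _⟩) := by
                rw [pvMatch]; simp
              rw [hm]
              cases s with
              | nil => cases start with
                | none => simp [pvGoA]
                | some a => simp [pvGoA]
              | cons o' s' => simp [pvGoA]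
            · -- '{' met by ']': mismatch, A resets
              have hm : pvMatch (if ('{':Char) = '{' then '}' else ']') (']' :: rest) i
                  = (.mismatch, i, ⟨rest, Nat.le_succ _⟩) := by
                rw [pvMatch]; simp
              rw [hm]; simp [pvGoA]
            · -- '[' met by '}': mismatch, A resets
              have hm : pvMatch (if ('[':Char) = '{' then '}' else ']') ('}' :: rest) i
                  = (.mismatch, i, ⟨rest, Nat.le_succ _⟩) := by
                rw [pvMatch]; simp
              rw [hm]; simp [pvGoA]
            · -- '[' closed by ']': A pops; pvMatch returns .ok
              have hm : pvMatch (if ('[':Char) = '{' then '}' else ']') (']' :: rest) i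
                  = (.ok, i, ⟨rest, Nat.le_succ _⟩) := by
                rw [pvMatch]; simp
              rw [hm]
              cases s with
              | nil => cases start with
                | none => simp [pvGoA]
                | some a => simp [pvGoA]
              | cons o' s' => simp [pvGoA]
          · -- ordinary character
            have hgo : pvGoA text (((i, c)) :: PySem.List.enumerate rest (i+1)) cand (o :: s) start false false
                = pvGoA text (PySem.List.enumerate rest (i+1)) cand (o :: s) start false false := by
              simp [pvGoA, h2, h3, h4]
            rw [hgo, ih _ hr _ _ _ _ _ ho hs]
            have : pvMatch (if o = '{' then '}' else ']') (c :: rest) i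
                = (let res := pvMatch (if o = '{' then '}' else ']') rest (i + 1)
                   ⟨res.1, res.2.1, res.2.2.1, le_trans res.2.2.2 (Nat.le_succ _)⟩) := by
              rw [pvMatch]; simp [h2, h3, h4]
            rw [this]

-- A with an empty stack = the top-level scan of B.
lemma pvGoA_scan (text : List Char) :
    ∀ (n : Nat) (l : List Char), l.length ≤ n →
    ∀ (i : Int) (cand : List String) (start : Option Int),
    pvGoA text (PySem.List.enumerate l i) cand [] start false false = pvScan text l i cand := by
  intro n
  induction n with
  | zero =>
    intro l hl i cand start
    have : l = [] := List.length_eq_zero_iff.mp (Nat.le_zero.mp hl)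
    subst this; simp [pvGoA, pvScan]
  | succ n ih =>
    intro l hl i cand start
    cases l with
    | nil => simp [pvGoA, pvScan]
    | cons c rest =>
      have hr : rest.length ≤ n := by simpa using hl
      rw [PySem.List.enumerate_cons]
      by_cases h2 : c = '"'
      · subst h2
        rw [show pvGoA text (((i, '"')) :: PySem.List.enumerate rest (i+1)) cand [] start false false
              = pvGoA text (PySem.List.enumerate rest (i+1)) cand [] start true false by
            simp [pvGoA]]
        rw [pvGoA_string]
        have hsk := pvSkipStr_len rest (i + 1) false
        rw [ih _ (le_trans hsk hr)]
        rw [pvScan]; simp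
      · by_cases h3 : c = '{' ∨ c = '['
        · have hgo : pvGoA text (((i, c)) :: PySem.List.enumerate rest (i+1)) cand [] start false false
              = pvGoA text (PySem.List.enumerate rest (i+1)) cand [c] (some i) false false := by
            simp [pvGoA, h2, h3]
          rw [hgo, pvGoA_match text n rest hr _ _ _ _ _ h3 (by simp)]
          rcases hmi : pvMatch (if c = '{' then '}' else ']') rest (i + 1) with ⟨st, j, r⟩
          rw [pvScan]
          simp only [h2, if_false, h3, if_true, hmi]
          cases st with
          | ok =>
            have hihr := ih r.1 (le_trans r.2 hr) (j + 1)
              (cand ++ [String.ofList (PySem.List.slice text (some i) (some (j + 1)))]) none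
            simpa using hihr
          | mismatch =>
            have hihr := ih r.1 (le_trans r.2 hr) (j + 1) cand none
            simpa using hihr
          | ended => simp
        · have hgo : pvGoA text (((i, c)) :: PySem.List.enumerate rest (i+1)) cand [] start false false
              = pvGoA text (PySem.List.enumerate rest (i+1)) cand [] start false false := by
            by_cases h4 : c = '}' ∨ c = ']' <;> simp [pvGoA, h2, h3, h4]
          rw [hgo, ih _ hr]
          rw [pvScan]; simp [h2, h3]

-- ===== VERDICT (by name: the statement is the Claim_ definition above) =====
theorem extract_json_candidates_py_spec : Claim_equal_extract_json_candidates_py := by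
  intro text _
  unfold Spec_extract_json_candidates_py extract_json_candidates_py extract_json_candidates_py_alt
  by_cases h : text.toList.isEmpty
  · have : text.toList = [] := by simpa using h
    simp [this, pvScan]
  · simp only [h, if_false, Bool.false_eq_true]
    exact pvGoA_scan text.toList text.toList.length text.toList (Nat.le_refl _) 0 [] none
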